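-- pv_equiv track=rewrite | github.com/paul-everstride/seasonal-planner | planner.py | cluster_race_weeks
-- ===== SOURCE A (Python) =====
-- def cluster_race_weeks(race_weeks: list[int], gap: int = 2) -> list[tuple[int, int]]:
--     """Group race weeks within `gap` weeks of each other; return (first, last) of each cluster."""
--     if not race_weeks:
--         return []
--     sorted_weeks = sorted(set(race_weeks))
--     clusters: list[list[int]] = []
--     cluster = [sorted_weeks[0]]
--     for week in sorted_weeks[1:]:
--         if week - cluster[-1] <= gap:
--             cluster.append(week)
--         else:
--             clusters.append(cluster)
--             cluster = [week]
--     clusters.append(cluster)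
--     return [(min(c), max(c)) for c in clusters]
-- ===== SOURCE B (Python) =====
-- def cluster_race_weeks(race_weeks: list[int], gap: int = 2) -> list[tuple[int, int]]:
--     """Staged passes instead of a greedy stateful loop: compute the break
--     indices of the sorted unique weeks, then emit each cluster's endpoints
--     directly from consecutive boundary indices."""
--     s = sorted(set(race_weeks))
--     if not s:
--         return []
--     n = len(s)
--     breaks = [i for i in range(1, n) if s[i] - s[i - 1] > gap]
--     starts = [0] + breaks
--     ends = breaks + [n]
--     return [(s[i], s[j - 1]) for i, j in zip(starts, ends)]
-- ===== Notes on version B (the rewrite author's own statement) =====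
-- stated objective: alternative
-- what changed: A grows cluster member-lists in one stateful greedy pass and maps min/max over them; B has no cluster state at all: it first computes the list of break indices of the sorted unique weeks, then emits each cluster's (first, last) pair by indexing at consecutive boundary positions.
import Mathlib
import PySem

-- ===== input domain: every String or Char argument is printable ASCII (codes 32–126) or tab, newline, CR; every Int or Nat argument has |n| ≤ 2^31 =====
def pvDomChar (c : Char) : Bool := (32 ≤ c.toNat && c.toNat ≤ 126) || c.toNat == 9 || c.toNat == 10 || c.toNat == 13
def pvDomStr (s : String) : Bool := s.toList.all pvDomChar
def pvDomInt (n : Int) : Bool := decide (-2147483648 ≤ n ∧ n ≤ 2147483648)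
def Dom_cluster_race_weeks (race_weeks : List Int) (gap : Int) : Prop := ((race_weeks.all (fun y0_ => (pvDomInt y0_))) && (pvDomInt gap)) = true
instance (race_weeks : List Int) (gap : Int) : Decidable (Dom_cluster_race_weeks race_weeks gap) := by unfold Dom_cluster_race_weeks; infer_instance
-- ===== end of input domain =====

-- B replaces A's stateful greedy pass (growing cluster member-lists, then min/max) by staged
-- passes: compute the break indices of the sorted unique weeks, then emit each cluster's
-- endpoints by indexing at consecutive boundary positions (objective: alternative).

-- ===== PORT A =====
-- loop body: append week to the cluster if within gap of its last element, else flush the cluster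
def pvStepA (gap : Int) (st : List (List Int) × List Int) (week : Int) : List (List Int) × List Int :=
  if week - PySem.List.pyGetD st.2 (-1) 0 ≤ gap then (st.1, st.2 ++ [week])
  else (st.1 ++ [st.2], [week])

def cluster_race_weeks (race_weeks : List Int) (gap : Int) : List (Int × Int) :=
  if race_weeks = [] then []
  else
    let sorted_weeks := PySem.List.sorted (PySem.Set.ofList race_weeks) (fun x => x) false
    -- sorted_weeks[0]: race_weeks ≠ [] so sorted_weeks ≠ [] and the index is in range
    let r := (PySem.List.slice sorted_weeks (some 1) none).foldl (pvStepA gap)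
               ([], [PySem.List.pyGetD sorted_weeks 0 0])
    (r.1 ++ [r.2]).map (fun c =>
      ((PySem.List.min? c (fun x => x)).getD 0, (PySem.List.max? c (fun x => x)).getD 0))

-- ===== PORT B =====
def cluster_race_weeks_alt (race_weeks : List Int) (gap : Int) : List (Int × Int) :=
  let s := PySem.List.sorted (PySem.Set.ofList race_weeks) (fun x => x) false
  if s = [] then []
  else
    let n : Int := s.length
    -- s[i] / s[i-1]: every index used is in range, so the pyGetD default is never taken
    let breaks := (PySem.List.pyRange 1 n 1).filter
      (fun i => decide (PySem.List.pyGetD s i 0 - PySem.List.pyGetD s (i - 1) 0 > gap))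
    let starts := 0 :: breaks
    let ends := breaks ++ [n]
    (starts.zip ends).map (fun p => (PySem.List.pyGetD s p.1 0, PySem.List.pyGetD s (p.2 - 1) 0))

-- ===== PRECONDITION & SPEC =====
def Spec_cluster_race_weeks (race_weeks : List Int) (gap : Int) (out : List (Int × Int)) : Prop := out = cluster_race_weeks_alt race_weeks gap
instance (race_weeks : List Int) (gap : Int) (out : List (Int × Int)) : Decidable (Spec_cluster_race_weeks race_weeks gap out) := by unfold Spec_cluster_race_weeks; infer_instance

-- ===== CLAIM (what is proved, stated in full; the proofs are below) =====
def Claim_equal_cluster_race_weeks : Prop := ∀ (race_weeks : List Int) (gap : Int), Dom_cluster_race_weeks race_weeks gap → Spec_cluster_race_weeks race_weeks gap (cluster_race_weeks race_weeks gap)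

-- ===== LEMMAS AND PROOFS =====

-- A's per-cluster summary: (min(c), max(c)) as the port computes them
def pvF (c : List Int) : Int × Int :=
  ((PySem.List.min? c (fun x => x)).getD 0, (PySem.List.max? c (fun x => x)).getD 0)

-- reference recursion: the clusters of a strictly increasing list, carrying (lo, hi)
def pvGo (gap lo hi : Int) : List Int → List (Int × Int)
  | [] => [(lo, hi)]
  | w :: rest => if w - hi ≤ gap then pvGo gap lo w rest else (lo, hi) :: pvGo gap w w rest

-- break-index recursion: indices i where the gap before position i exceeds `gap`
def pvBrk (gap : Int) : Int → List Int → Nat → List Int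
  | _, [], _ => []
  | prev, w :: u, i =>
    if gap < w - prev then (i : Int) :: pvBrk gap w u (i + 1) else pvBrk gap w u (i + 1)

theorem pvLe_getLast_of_sorted {c : List Int} (hs : c.Pairwise (· ≤ ·)) {x : Int}
    (hx : x ∈ c) (h : c ≠ []) : x ≤ c.getLast h := by
  induction c with
  | nil => cases hx
  | cons a t ih =>
    rcases List.pairwise_cons.1 hs with ⟨ha, ht⟩
    cases t with
    | nil => simp at hx; simp [hx]
    | cons b u =>
      rw [List.getLast_cons (by simp)]
      rcases List.mem_cons.1 hx with rfl | hx
      · exact ha _ (List.getLast_mem _)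
      · exact ih ht hx (by simp)

-- on a nonempty strictly increasing list, A's (min, max) is (head, getLast)
theorem pvF_sorted {c : List Int} (hc : c.Pairwise (· < ·)) (h : c ≠ []) :
    pvF c = (c.head h, c.getLast h) := by
  have hle : c.Pairwise (· ≤ ·) := hc.imp le_of_lt
  obtain ⟨m, hm⟩ : ∃ m, PySem.List.min? c (fun x => x) = some m := by
    cases hmin : PySem.List.min? c (fun x : Int => x) with
    | none => exact absurd ((PySem.List.min?_eq_none_iff _ _).1 hmin) h
    | some m => exact ⟨m, rfl⟩
  obtain ⟨M, hM⟩ : ∃ M, PySem.List.max? c (fun x => x) = some M := by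
    cases hmax : PySem.List.max? c (fun x : Int => x) with
    | none => exact absurd ((PySem.List.max?_eq_none_iff _ _).1 hmax) h
    | some M => exact ⟨M, rfl⟩
  have hmmem := PySem.List.min?_mem hm
  have hMmem := PySem.List.max?_mem hM
  have h1 : m ≤ c.head h := PySem.List.min?_isMin hm _ (List.head_mem h)
  have h2 : c.head h ≤ m := by
    cases c with
    | nil => exact absurd rfl h
    | cons a t =>
      rcases List.pairwise_cons.1 hle with ⟨ha, _⟩
      rcases List.mem_cons.1 hmmem with rfl | hmt
      · simp
      · simpa using ha _ hmt
  have h3 : c.getLast h ≤ M := PySem.List.max?_isMax hM _ (List.getLast_mem h)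
  have h4 : M ≤ c.getLast h := pvLe_getLast_of_sorted hle hMmem h
  simp [pvF, hm, hM, le_antisymm h1 h2, le_antisymm h4 h3]

-- A-side: the greedy fold with cluster sublists computes the reference recursion
theorem pvMainA (gap : Int) : ∀ (ws cluster : List Int) (clusters : List (List Int))
    (h : cluster ≠ []) (hch : (cluster ++ ws).IsChain (· < ·)),
    (let r := ws.foldl (pvStepA gap) (clusters, cluster)
     (r.1 ++ [r.2]).map pvF)
    = clusters.map pvF ++ pvGo gap (cluster.head h) (cluster.getLast h) ws := by
  intro ws
  induction ws with
  | nil =>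
    intro cluster clusters h hch
    simp only [List.foldl_nil, List.map_append]
    have := pvF_sorted (List.isChain_iff_pairwise.1 (by simpa using hch)) h
    simp [pvGo, this]
  | cons w ws ih =>
    intro cluster clusters h hch
    have hsplit := (List.isChain_append (l₁ := cluster) (l₂ := w :: ws)).1
      (by simpa using hch)
    obtain ⟨hc1, hc2, hlink⟩ := hsplit
    have hlast : cluster.getLast h < w := by
      have := hlink (cluster.getLast h) (by simp [List.getLast?_eq_getLast_of_ne_nil h]) w (by simp)
      exact this
    simp only [List.foldl_cons]
    have hpg : PySem.List.pyGetD cluster (-1) 0 = cluster.getLast h :=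
      PySem.List.pyGetD_neg_one cluster 0 h
    by_cases hgap : w - cluster.getLast h ≤ gap
    · have hA : pvStepA gap (clusters, cluster) w = (clusters, cluster ++ [w]) := by
        simp only [pvStepA, hpg]; rw [if_pos hgap]
      rw [hA]
      have h' : cluster ++ [w] ≠ [] := by simp
      have hch' : ((cluster ++ [w]) ++ ws).IsChain (· < ·) := by
        simpa [List.append_assoc] using hch
      have := ih (cluster ++ [w]) clusters h' hch'
      simpa [pvGo, hgap, List.head_append_of_ne_nil, List.getLast_append, h] using this
    · have hA : pvStepA gap (clusters, cluster) w = (clusters ++ [cluster], [w]) := by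
        simp only [pvStepA, hpg]; rw [if_neg hgap]
      rw [hA]
      have hch' : (([w] : List Int) ++ ws).IsChain (· < ·) := by simpa using hc2
      have := ih [w] (clusters ++ [cluster]) (by simp) hch'
      have hf := pvF_sorted (List.isChain_iff_pairwise.1 hc1) h
      simpa [pvGo, hgap, hf] using this

-- B-side pass 1: the filtered range of break positions is the break recursion
theorem pvMainF (s : List Int) (gap : Int) : ∀ (l : List Int) (i : Nat) (prev : Int),
    1 ≤ i → s.drop i = l → i + l.length = s.length →
    prev = PySem.List.pyGetD s ((i : Int) - 1) 0 →
    (PySem.List.pyRange (i : Int) (s.length : Int) 1).filter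
      (fun j => decide (PySem.List.pyGetD s j 0 - PySem.List.pyGetD s (j - 1) 0 > gap))
    = pvBrk gap prev l i := by
  intro l
  induction l with
  | nil =>
    intro i prev h1 hd hlen hprev
    have hi : i = s.length := by simpa using hlen
    rw [PySem.List.pyRange_one_eq_nil (by exact_mod_cast hi.ge)]
    simp [pvBrk]
  | cons w u ih =>
    intro i prev h1 hd hlen hprev
    have hilt : i < s.length := by simp at hlen; omega
    have hgetw : PySem.List.pyGetD s (i : Int) 0 = w := by
      rw [PySem.List.pyGetD_natCast]
      have : s.drop i = w :: u := hd
      have h0 : (s.drop i).getD 0 0 = w := by rw [this]; rfl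
      rw [List.getD_eq_getElem?_getD] at h0 ⊢
      rwa [List.getElem?_drop, Nat.add_zero] at h0
    have hcons : PySem.List.pyRange (i : Int) (s.length : Int) 1
        = (i : Int) :: PySem.List.pyRange ((i : Int) + 1) (s.length : Int) 1 :=
      PySem.List.pyRange_one_cons (by exact_mod_cast hilt)
    rw [hcons, List.filter_cons]
    have hdu : s.drop (i + 1) = u := by
      have := hd; rw [← List.drop_drop, this]; rfl
    have hlen' : (i + 1) + u.length = s.length := by simp at hlen ⊢; omega
    have hprev' : w = PySem.List.pyGetD s (((i + 1 : Nat) : Int) - 1) 0 := by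
      rw [show (((i + 1 : Nat) : Int) - 1) = (i : Int) by push_cast; ring, hgetw]
    have hih := ih (i + 1) w (by omega) hdu hlen' hprev'
    rw [show ((i : Int) + 1) = ((i + 1 : Nat) : Int) by push_cast; ring, hih]
    simp only [hgetw, ← hprev]
    by_cases hg : gap < w - prev
    · rw [if_pos (by simpa using hg)]
      simp [pvBrk, hg]
    · rw [if_neg (by simpa using hg)]
      simp [pvBrk, hg]

-- B-side pass 2: emitting endpoint pairs at consecutive boundaries is the reference recursion
theorem pvMainE (s : List Int) (gap : Int) : ∀ (l : List Int) (i st : Nat) (prev : Int),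
    1 ≤ i → s.drop i = l → i + l.length = s.length →
    prev = PySem.List.pyGetD s ((i : Int) - 1) 0 →
    (((st : Int) :: pvBrk gap prev l i).zip (pvBrk gap prev l i ++ [(s.length : Int)])).map
      (fun p => (PySem.List.pyGetD s p.1 0, PySem.List.pyGetD s (p.2 - 1) 0))
    = pvGo gap (PySem.List.pyGetD s (st : Int) 0) prev l := by
  intro l
  induction l with
  | nil =>
    intro i st prev h1 hd hlen hprev
    have : (i : Int) = (s.length : Int) := by simp at hlen; omega
    simp [pvBrk, pvGo, hprev, this]
  | cons w u ih =>
    intro i st prev h1 hd hlen hprev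
    have hilt : i < s.length := by simp at hlen; omega
    have hgetw : PySem.List.pyGetD s (i : Int) 0 = w := by
      rw [PySem.List.pyGetD_natCast]
      have h0 : (s.drop i).getD 0 0 = w := by rw [hd]; rfl
      rw [List.getD_eq_getElem?_getD] at h0 ⊢
      rwa [List.getElem?_drop, Nat.add_zero] at h0
    have hdu : s.drop (i + 1) = u := by rw [← List.drop_drop, hd]; rfl
    have hlen' : (i + 1) + u.length = s.length := by simp at hlen ⊢; omega
    have hprev' : w = PySem.List.pyGetD s (((i + 1 : Nat) : Int) - 1) 0 := by
      rw [show (((i + 1 : Nat) : Int) - 1) = (i : Int) by push_cast; ring, hgetw]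
    by_cases hg : gap < w - prev
    · have hbrk : pvBrk gap prev (w :: u) i = (i : Int) :: pvBrk gap w u (i + 1) := by
        simp [pvBrk, hg]
      have hih := ih (i + 1) i w (by omega) hdu hlen' hprev'
      rw [hbrk]
      simp only [List.cons_append, List.zip_cons_cons, List.map_cons]
      rw [hih, hgetw]
      have : PySem.List.pyGetD s ((i : Int) - 1) 0 = prev := hprev.symm
      simp [pvGo, this, not_le.2 (by omega : gap < w - prev)]
    · have hbrk : pvBrk gap prev (w :: u) i = pvBrk gap w u (i + 1) := by
        simp [pvBrk, hg]
      have hih := ih (i + 1) st w (by omega) hdu hlen' hprev'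
      rw [hbrk, hih]
      simp [pvGo, not_lt.1 hg]

-- ===== VERDICT (by name: the statement is the Claim_ definition above) =====
theorem cluster_race_weeks_spec : Claim_equal_cluster_race_weeks := by
  intro race_weeks gap _
  unfold Spec_cluster_race_weeks cluster_race_weeks cluster_race_weeks_alt
  by_cases hrw : race_weeks = []
  · subst hrw
    have hempty : PySem.List.sorted ([] : List Int) (fun x => x) false = ([] : List Int) := by decide
    simp [hempty]
  · simp only [hrw, if_false]
    set s := PySem.List.sorted (PySem.Set.ofList race_weeks) (fun x => x) false with hs
    have hchain : s.IsChain (· < ·) :=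
      List.isChain_iff_pairwise.2 (PySem.List.sorted_ofList_pairwise_lt (xs := race_weeks))
    have hsne : s ≠ [] := by
      intro hnil
      obtain ⟨x, hx⟩ := List.exists_mem_of_ne_nil race_weeks hrw
      have : x ∈ s := by
        rw [hs, PySem.List.mem_sorted]
        exact (PySem.Set.mem_ofList _ _).2 hx
      simp [hnil] at this
    obtain ⟨a, t, hat⟩ := List.exists_cons_of_ne_nil hsne
    rw [if_neg hsne]
    have hget : PySem.List.pyGetD s 0 0 = a := by
      rw [hat]; exact PySem.List.pyGetD_zero_cons _ _ _
    have htail : PySem.List.slice s (some 1) none = t := by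
      rw [PySem.List.slice_from_one, hat]; rfl
    -- A's side equals the reference recursion
    have hA := pvMainA gap t [a] [] (by simp) (by simpa [hat] using hchain)
    simp only [hget, htail, List.map_nil, List.nil_append] at hA ⊢
    simp only [List.head_cons, List.getLast_singleton] at hA
    have hfn : (fun c : List Int => ((PySem.List.min? c (fun x => x)).getD 0,
        (PySem.List.max? c (fun x => x)).getD 0)) = pvF := rfl
    rw [hfn, hA]
    -- B's side equals the reference recursion
    have hd1 : s.drop 1 = t := by rw [hat]; rfl
    have hlen1 : 1 + t.length = s.length := by rw [hat]; simp [Nat.add_comm]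
    have hprev1 : a = PySem.List.pyGetD s ((1 : Nat) - 1 : Int) 0 := by
      norm_num; exact hget.symm
    have hF := pvMainF s gap t 1 a le_rfl hd1 hlen1 hprev1
    have hE := pvMainE s gap t 1 0 a le_rfl hd1 hlen1 hprev1
    simp only [Nat.cast_zero, hget] at hE
    norm_num at hF
    rw [hF]
    exact hE.symm
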